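-- pv_equiv track=rewrite | github.com/achen272/csc201spring2016 | Chen-Program03-Part2.py | dna_Length
-- ===== SOURCE A (Python) =====
-- def dna_Length(DNA1,DNA2):
--         count = 0
--         maxMatch = 0
--         if len(DNA1) > len(DNA2):
--             small = DNA2
--             big = DNA1
--         else:
--            small = DNA1
--            big = DNA2
--
--         for i in range(len(small)):
--                 if small[i] == big[i]:
--                         count += 1
--                 else:
--                         count = 0
--                 if count > maxMatch:
--                         maxMatch = count
--         return maxMatch
-- ===== SOURCE B (Python) =====
-- def dna_Length(DNA1, DNA2):
--     matches = ''.join('x' if a == b else ' ' for a, b in zip(DNA1, DNA2))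
--     return max((len(run) for run in matches.split(' ')), default=0)
-- ===== Notes on version B (the rewrite author's own statement) =====
-- stated objective: simpler
-- what changed: Replaces the index loop with running count-and-reset accumulators by a build-then-reduce pipeline: zip the strings into a match mask string, split it on mismatch markers, and take the max piece length.
import Mathlib
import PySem

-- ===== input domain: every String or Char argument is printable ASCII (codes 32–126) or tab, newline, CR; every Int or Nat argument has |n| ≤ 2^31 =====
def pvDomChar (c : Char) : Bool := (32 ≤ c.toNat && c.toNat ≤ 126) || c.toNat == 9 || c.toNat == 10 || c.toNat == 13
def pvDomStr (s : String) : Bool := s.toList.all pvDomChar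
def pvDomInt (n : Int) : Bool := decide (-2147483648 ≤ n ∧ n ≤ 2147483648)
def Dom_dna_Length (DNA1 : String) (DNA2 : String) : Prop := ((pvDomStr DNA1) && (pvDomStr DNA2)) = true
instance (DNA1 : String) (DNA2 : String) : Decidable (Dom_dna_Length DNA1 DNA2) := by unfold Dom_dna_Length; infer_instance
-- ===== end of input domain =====

-- B replaces A's running count-and-reset accumulator loop by a build-then-reduce pipeline
-- (build a match-mask string, split it on mismatch markers, take the max piece length).

-- ===== PORT A =====
def dna_Length (DNA1 : String) (DNA2 : String) : Int :=
  let count : Int := 0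
  let maxMatch : Int := 0
  let sb : String × String :=
    if PySem.Str.len DNA1 > PySem.Str.len DNA2 then (DNA2, DNA1) else (DNA1, DNA2)
  let small := sb.1
  let big := sb.2
  let r := (PySem.List.pyRange 0 (PySem.Str.len small) 1).foldl
    (fun (s : Int × Int) i =>
      let count := if PySem.Str.pyGet? small i == PySem.Str.pyGet? big i then s.1 + 1 else 0
      let maxMatch := if count > s.2 then count else s.2
      (count, maxMatch)) (count, maxMatch)
  r.2

-- ===== PORT B =====
def dna_Length_alt (DNA1 : String) (DNA2 : String) : Int :=
  let matchesS : String :=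
    PySem.Str.join "" (List.zipWith (fun a b => if a == b then "x" else " ") DNA1.toList DNA2.toList)
  PySem.List.maxD ((PySem.Chars.splitOn matchesS.toList [' ']).map (fun run => (run.length : Int)))
    (fun x => x) 0

-- ===== PRECONDITION & SPEC =====
def Spec_dna_Length (DNA1 : String) (DNA2 : String) (out : Int) : Prop := out = dna_Length_alt DNA1 DNA2
instance (DNA1 : String) (DNA2 : String) (out : Int) : Decidable (Spec_dna_Length DNA1 DNA2 out) := by unfold Spec_dna_Length; infer_instance

-- ===== CLAIM (what is proved, stated in full; the proofs are below) =====
def Claim_equal_dna_Length : Prop := ∀ (DNA1 : String) (DNA2 : String), Dom_dna_Length DNA1 DNA2 → Spec_dna_Length DNA1 DNA2 (dna_Length DNA1 DNA2)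

-- ===== LEMMAS AND PROOFS =====

def pvStep (s : Int × Int) (b : Bool) : Int × Int :=
  let count := if b then s.1 + 1 else 0
  let maxMatch := if count > s.2 then count else s.2
  (count, maxMatch)

def pvRunLens : List Bool → Int × List Int
  | [] => (0, [])
  | true :: t => ((pvRunLens t).1 + 1, (pvRunLens t).2)
  | false :: t => (0, (pvRunLens t).1 :: (pvRunLens t).2)

def pvSplit : List Char → List Char × List (List Char)
  | [] => ([], [])
  | c :: rest =>
    if c = ' ' then ([], (pvSplit rest).1 :: (pvSplit rest).2)
    else (c :: (pvSplit rest).1, (pvSplit rest).2)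

theorem pvRunLens_fst_nonneg (ms : List Bool) : 0 ≤ (pvRunLens ms).1 := by
  induction ms with
  | nil => simp [pvRunLens]
  | cons b t ih =>
    cases b
    · simp [pvRunLens]
    · simp [pvRunLens]; omega

theorem pvSplit_go (l : List Char) : ∀ (fuel : Nat), l.length ≤ fuel → ∀ (cur : List Char) (acc : List (List Char)),
    PySem.Chars.splitOn.go [' '] fuel l cur acc
      = acc.reverse ++ (cur.reverse ++ (pvSplit l).1) :: (pvSplit l).2 := by
  induction l with
  | nil =>
    intro fuel _ cur acc
    cases fuel <;> simp [PySem.Chars.splitOn.go, pvSplit]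
  | cons c rest ih =>
    intro fuel hf cur acc
    cases fuel with
    | zero => simp at hf
    | succ f =>
      by_cases hc : c = ' '
      · subst hc
        rw [show PySem.Chars.splitOn.go [' '] (f+1) (' ' :: rest) cur acc
              = PySem.Chars.splitOn.go [' '] f rest [] (cur.reverse :: acc) from by
          simp [PySem.Chars.splitOn.go, List.isPrefixOf]]
        rw [ih f (by simpa using hf) [] (cur.reverse :: acc)]
        simp [pvSplit]
      · rw [show PySem.Chars.splitOn.go [' '] (f+1) (c :: rest) cur acc
              = PySem.Chars.splitOn.go [' '] f rest (c :: cur) acc from by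
          simp [PySem.Chars.splitOn.go, List.isPrefixOf, Ne.symm hc]]
        rw [ih f (by simpa using hf) (c :: cur) acc]
        simp [pvSplit, hc]

theorem pvSplitOn_eq (cs : List Char) :
    PySem.Chars.splitOn cs [' '] = (pvSplit cs).1 :: (pvSplit cs).2 := by
  rw [show PySem.Chars.splitOn cs [' '] = PySem.Chars.splitOn.go [' '] (cs.length + 1) cs [] [] from rfl]
  rw [pvSplit_go cs (cs.length + 1) (by omega) [] []]
  simp

theorem pvSplit_lens (ms : List Bool) :
    (((pvSplit (ms.map (fun b => if b then 'x' else ' '))).1.length : Int),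
      (pvSplit (ms.map (fun b => if b then 'x' else ' '))).2.map (fun r => (r.length : Int)))
      = pvRunLens ms := by
  induction ms with
  | nil => simp [pvSplit, pvRunLens]
  | cons b t ih =>
    have ih1 := congrArg Prod.fst ih
    have ih2 := congrArg Prod.snd ih
    simp only [] at ih1 ih2
    cases b
    · simp [pvSplit, pvRunLens, Prod.ext_iff]
      exact ⟨ih1, ih2⟩
    · simp [pvSplit, pvRunLens, Prod.ext_iff]
      exact ⟨by omega, ih2⟩

theorem pvMain (ms : List Bool) : ∀ (c m : Int), 0 ≤ c → c ≤ m →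
    (ms.foldl pvStep (c, m)).2
      = (pvRunLens ms).2.foldl max (max m (c + (pvRunLens ms).1)) := by
  induction ms with
  | nil => intro c m hc hcm; simp [pvRunLens]; omega
  | cons b t ih =>
    intro c m hc hcm
    cases b
    · have : pvStep (c, m) false = (0, m) := by simp [pvStep]; omega
      rw [List.foldl_cons, this, ih 0 m (by omega) (by omega)]
      simp only [pvRunLens, List.foldl_cons]
      congr 1
      omega
    · have : pvStep (c, m) true = (c + 1, max m (c + 1)) := by simp [pvStep]; omega
      rw [List.foldl_cons, this, ih (c+1) (max m (c+1)) (by omega) (by omega)]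
      simp only [pvRunLens]
      congr 1
      have := pvRunLens_fst_nonneg t
      omega

theorem pvZipFold : ∀ (ss bs : List Char) (init : Int × Int),
    (ss.zip bs).foldl (fun s p => pvStep s (p.1 == p.2)) init
      = (List.zipWith (fun a b => a == b) ss bs).foldl pvStep init := by
  intro ss
  induction ss with
  | nil => intro bs init; simp
  | cons a ss ih =>
    intro bs init
    cases bs with
    | nil => simp
    | cons b bs => simp [ih]

theorem pvBeq_comm : ∀ (xs ys : List Char),
    List.zipWith (fun a b => a == b) ys xs = List.zipWith (fun a b => a == b) xs ys := by
  intro xs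
  induction xs with
  | nil => intro ys; cases ys <;> simp
  | cons a xs ih =>
    intro ys
    cases ys with
    | nil => simp
    | cons y ys =>
      simp only [List.zipWith_cons_cons, ih]
      congr 1
      by_cases h : a = y
      · simp [h]
      · rw [beq_eq_false_iff_ne.mpr h, beq_eq_false_iff_ne.mpr (fun e => h e.symm)]

theorem pvA_fold (small big : String) (h : small.toList.length ≤ big.toList.length) :
    ((PySem.List.pyRange 0 (PySem.Str.len small) 1).foldl
      (fun (s : Int × Int) i =>
        let count := if PySem.Str.pyGet? small i == PySem.Str.pyGet? big i then s.1 + 1 else 0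
        let maxMatch := if count > s.2 then count else s.2
        (count, maxMatch)) ((0:Int), (0:Int)))
      = (List.zipWith (fun a b => a == b) small.toList big.toList).foldl pvStep (0, 0) := by
  have hz : (small.toList.zip big.toList).length = small.toList.length := by
    rw [List.length_zip]; omega
  have hlen : PySem.Str.len small = (((small.toList.zip big.toList)).length : Int) := by
    unfold PySem.Str.len
    rw [hz]
  rw [hlen]
  rw [PySem.List.foldl_congr_mem _ _
    (fun (s : Int × Int) (j : Int) =>
      pvStep s ((PySem.List.pyGetD (small.toList.zip big.toList) j (' ', ' ')).1
        == (PySem.List.pyGetD (small.toList.zip big.toList) j (' ', ' ')).2)) _ ?_]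
  · rw [PySem.List.foldl_pyRange_zero_pyGetD' (small.toList.zip big.toList) (' ', ' ')
      (fun (s : Int × Int) (p : Char × Char) => pvStep s (p.1 == p.2)) ((0:Int),(0:Int))]
    exact pvZipFold _ _ _
  · intro acc x hx
    rw [PySem.List.mem_pyRange_one] at hx
    have hx2 : x.toNat < (small.toList.zip big.toList).length := by omega
    have hxs : x.toNat < small.toList.length := by
      simp [List.length_zip] at hx2 ⊢; omega
    have hxb : x.toNat < big.toList.length := by omega
    simp only [PySem.Str.pyGet?_eq, PySem.Chars.pyGet?_eq_listPyGet?]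
    simp only [PySem.List.pyGet?_of_nonneg _ hx.1, PySem.List.pyGetD_of_nonneg _ _ hx.1]
    rw [List.getElem?_eq_getElem hxs, List.getElem?_eq_getElem hxb]
    simp [List.getD_eq_getElem?_getD, List.getElem?_eq_getElem hx2, List.getElem_zip, pvStep]

theorem pvZipWith_ext {α β γ : Type} (f g : α → β → γ) (h : ∀ a b, f a b = g a b) :
    ∀ (xs : List α) (ys : List β), List.zipWith f xs ys = List.zipWith g xs ys := by
  intro xs
  induction xs with
  | nil => intro ys; simp
  | cons a xs ih =>
    intro ys
    cases ys with
    | nil => simp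
    | cons y ys => simp [h, ih]

theorem pvB_toList (xs ys : List Char) :
    (PySem.Str.join "" (List.zipWith (fun a b => if a == b then "x" else " ") xs ys)).toList
      = (List.zipWith (fun a b => a == b) xs ys).map (fun b => if b then 'x' else ' ') := by
  have h1 : (List.zipWith (fun a b => if a == b then "x" else " ") xs ys).map String.toList
      = ((List.zipWith (fun a b => a == b) xs ys).map (fun b => if b then 'x' else ' ')).map
          (fun c => [c]) := by
    rw [List.map_zipWith, List.map_map, List.map_zipWith]
    apply pvZipWith_ext
    intro a b
    by_cases h : a = b <;> simp [h]
  unfold PySem.Str.join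
  rw [String.toList_ofList, h1, show ("".toList : List Char) = [] from rfl,
    PySem.Chars.join_nil_singletons]

theorem pvMaxD_cons : ∀ (t : List Int) (x : Int),
    PySem.List.maxD (x :: t) (fun y => y) 0 = t.foldl max x := by
  intro t
  induction t with
  | nil => intro x; rfl
  | cons y t ih =>
    intro x
    have h1 : PySem.List.maxD (x :: y :: t) (fun y => y) 0
        = PySem.List.maxD (max x y :: t) (fun y => y) 0 := by
      unfold PySem.List.maxD PySem.List.max?
      simp only [List.foldl_cons]
      have hacc : (if x < y then some y else some x) = some (max x y) := by
        split_ifs with h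
        · exact congrArg some (by omega : y = max x y)
        · exact congrArg some (by omega : x = max x y)
      rw [hacc]
    rw [h1, ih (max x y)]
    rw [List.foldl_cons]

theorem pvCore (xs ys : List Char) :
    ((List.zipWith (fun a b => a == b) xs ys).foldl pvStep ((0:Int), (0:Int))).2
      = PySem.List.maxD
          ((PySem.Chars.splitOn
              ((List.zipWith (fun a b => a == b) xs ys).map (fun b => if b then 'x' else ' '))
              [' ']).map (fun run => (run.length : Int)))
          (fun x => x) 0 := by
  have hl := pvSplit_lens (List.zipWith (fun a b => a == b) xs ys)
  have hl1 := congrArg Prod.fst hl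
  have hl2 := congrArg Prod.snd hl
  simp only [] at hl1 hl2
  rw [pvSplitOn_eq, List.map_cons]
  simp only [hl1, hl2]
  rw [pvMaxD_cons _ _]
  rw [pvMain (List.zipWith (fun a b => a == b) xs ys) 0 0 (by omega) (by omega)]
  have := pvRunLens_fst_nonneg (List.zipWith (fun a b => a == b) xs ys)
  congr 1
  omega

-- ===== VERDICT =====
theorem dna_Length_spec : Claim_equal_dna_Length := by
  intro DNA1 DNA2 _
  unfold Spec_dna_Length dna_Length dna_Length_alt
  simp only []
  by_cases hgt : PySem.Str.len DNA1 > PySem.Str.len DNA2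
  · rw [if_pos hgt]
    have hle : DNA2.toList.length ≤ DNA1.toList.length := by
      unfold PySem.Str.len at hgt; omega
    rw [pvA_fold DNA2 DNA1 hle]
    rw [pvBeq_comm DNA1.toList DNA2.toList]
    rw [pvB_toList DNA1.toList DNA2.toList]
    exact pvCore _ _
  · rw [if_neg hgt]
    have hle : DNA1.toList.length ≤ DNA2.toList.length := by
      unfold PySem.Str.len at hgt; omega
    rw [pvA_fold DNA1 DNA2 hle]
    rw [pvB_toList DNA1.toList DNA2.toList]
    exact pvCore _ _
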